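-- pv_equiv track=rewrite | github.com/Mosaibah/oreilly-ingest | plugins/chapters.py | _reorder_cover_first
-- ===== SOURCE A (Python) =====
-- def _reorder_cover_first(chapters: list[dict]) -> list[dict]:
--     cover_chapters = []
--     other_chapters = []
--
--     for ch in chapters:
--         filename_lower = ch["filename"].lower()
--         title_lower = ch["title"].lower()
--         if "cover" in filename_lower or "cover" in title_lower:
--             cover_chapters.append(ch)
--         else:
--             other_chapters.append(ch)
--
--     return cover_chapters + other_chapters
-- ===== SOURCE B (Python) =====
-- def _reorder_cover_first(chapters: list[dict]) -> list[dict]: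
--     return sorted(
--         chapters,
--         key=lambda ch: 0
--         if "cover" in ch["filename"].lower() or "cover" in ch["title"].lower()
--         else 1,
--     )
-- ===== Notes on version B (the rewrite author's own statement) =====
-- stated objective: idiomatic
-- what changed: Replaces the explicit two-list partition-and-concatenate loop with a single stable sort on a binary key (0 for cover chapters, 1 otherwise), relying on sort stability to preserve original order within each group.
import Mathlib
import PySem

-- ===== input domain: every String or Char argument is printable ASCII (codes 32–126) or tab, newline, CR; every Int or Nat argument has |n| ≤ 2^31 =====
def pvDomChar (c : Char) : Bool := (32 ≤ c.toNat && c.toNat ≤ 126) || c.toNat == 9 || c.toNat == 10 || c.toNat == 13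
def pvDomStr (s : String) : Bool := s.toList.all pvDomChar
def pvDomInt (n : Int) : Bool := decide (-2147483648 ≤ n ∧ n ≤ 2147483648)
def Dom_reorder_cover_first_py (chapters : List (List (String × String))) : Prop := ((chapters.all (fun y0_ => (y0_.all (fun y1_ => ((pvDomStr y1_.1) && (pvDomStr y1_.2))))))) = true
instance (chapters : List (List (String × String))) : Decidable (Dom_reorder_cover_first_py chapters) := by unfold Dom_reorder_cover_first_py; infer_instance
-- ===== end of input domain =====

-- B replaces A's explicit two-list partition with one stable sort on a binary key (0 = cover, 1 = other); idiomatic, same result.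


-- ===== PORT A =====
-- literal port of A: one loop appending each chapter to cover_chapters or other_chapters, then concatenation.
-- ch["filename"] / ch["title"] are ported as Dict.getD with default "": total form, exact under Pre_ (both keys present).
def reorder_cover_first_py (chapters : List (List (String × String))) : List (List (String × String)) :=
  let st := chapters.foldl
    (fun (acc : List (List (String × String)) × List (List (String × String))) ch =>
      let filename_lower := PySem.Str.lower ((PySem.Dict.mk ch).getD "filename" "")
      let title_lower := PySem.Str.lower ((PySem.Dict.mk ch).getD "title" "")
      if PySem.Str.isIn "cover" filename_lower || PySem.Str.isIn "cover" title_lower then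
        (acc.1 ++ [ch], acc.2)
      else
        (acc.1, acc.2 ++ [ch]))
    ([], [])
  st.1 ++ st.2

-- ===== PORT B =====
-- B's key function: 0 if "cover" occurs in the lowercased filename or title, else 1
def pvIsCover (ch : List (String × String)) : Bool :=
  PySem.Str.isIn "cover" (PySem.Str.lower ((PySem.Dict.mk ch).getD "filename" "")) ||
  PySem.Str.isIn "cover" (PySem.Str.lower ((PySem.Dict.mk ch).getD "title" ""))

-- literal port of B: a single stable sort on the binary key
def reorder_cover_first_py_alt (chapters : List (List (String × String))) : List (List (String × String)) :=
  PySem.List.sorted chapters (fun ch => if pvIsCover ch then (0 : Int) else 1)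

-- ===== PRECONDITION & SPEC =====
-- Pre_ excludes chapters missing the "filename" or "title" key, where Python A raises KeyError.
def Pre_reorder_cover_first_py (chapters : List (List (String × String))) : Prop :=
  (chapters.all (fun ch => (PySem.Dict.mk ch).contains "filename" && (PySem.Dict.mk ch).contains "title")) = true
instance (chapters : List (List (String × String))) : Decidable (Pre_reorder_cover_first_py chapters) := by unfold Pre_reorder_cover_first_py; infer_instance

def pvWitness_reorder_cover_first_py : (List (List (String × String))) :=
  [[("filename", "ch1.html"), ("title", "Intro")], [("filename", "cover.html"), ("title", "Cover")]]

def Spec_reorder_cover_first_py (chapters : List (List (String × String))) (out : List (List (String × String))) : Prop := out = reorder_cover_first_py_alt chapters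
instance (chapters : List (List (String × String))) (out : List (List (String × String))) : Decidable (Spec_reorder_cover_first_py chapters out) := by unfold Spec_reorder_cover_first_py; infer_instance

-- ===== CLAIM (what is proved, stated in full; the proofs are below) =====
def Claim_equal_reorder_cover_first_py : Prop := ∀ (chapters : List (List (String × String))), Dom_reorder_cover_first_py chapters → Pre_reorder_cover_first_py chapters → Spec_reorder_cover_first_py chapters (reorder_cover_first_py chapters)

-- ===== LEMMAS AND PROOFS =====

-- insertBy passes over elements it is not before, inserts in front of a run it is before
theorem pv_insertBy_append {α : Type} (b : α → α → Bool) (x : α) (C O : List α)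
    (hC : ∀ c ∈ C, b x c = false) :
    PySem.List.insertBy b x (C ++ O) = C ++ PySem.List.insertBy b x O := by
  induction C with
  | nil => simp
  | cons c C ih =>
    have hc := hC c (by simp)
    simp [PySem.List.insertBy, hc, ih (fun c hc => hC c (by simp [hc]))]

theorem pv_insertBy_of_forall_before {α : Type} (b : α → α → Bool) (x : α) (O : List α)
    (hO : ∀ o ∈ O, b x o = true) :
    PySem.List.insertBy b x O = x :: O := by
  cases O with
  | nil => simp [PySem.List.insertBy]
  | cons o O => simp [PySem.List.insertBy, hO o (by simp)]

-- stable insertion sort on the binary key 0/1 is exactly the partition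
theorem pv_foldl_insertBy_binary {α : Type} (p : α → Bool) (xs : List α) :
    ∀ (C O : List α), (∀ c ∈ C, p c = true) → (∀ o ∈ O, p o = false) →
      xs.foldl (fun acc x =>
          PySem.List.insertBy
            (fun a b => decide ((if p a then (0 : Int) else 1) < (if p b then (0 : Int) else 1))) x acc)
        (C ++ O)
      = (C ++ xs.filter p) ++ (O ++ xs.filter (fun x => !p x)) := by
  induction xs with
  | nil => intro C O _ _; simp
  | cons x xs ih =>
    intro C O hC hO
    by_cases hx : p x = true
    · have hins : PySem.List.insertBy
          (fun a b => decide ((if p a then (0 : Int) else 1) < (if p b then (0 : Int) else 1))) x (C ++ O)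
          = (C ++ [x]) ++ O := by
        rw [pv_insertBy_append _ _ _ _ (fun c hc => by simp [hx, hC c hc])]
        rw [pv_insertBy_of_forall_before _ _ _ (fun o ho => by simp [hx, hO o ho])]
        simp
      have := ih (C ++ [x]) O
        (by intro c hc; rcases List.mem_append.mp hc with h | h
            · exact hC c h
            · simpa using (List.mem_singleton.mp h) ▸ hx) hO
      simp only [List.foldl_cons, hins, this, List.filter_cons, hx]
      simp
    · have hx' : p x = false := by simp_all
      have hins : PySem.List.insertBy
          (fun a b => decide ((if p a then (0 : Int) else 1) < (if p b then (0 : Int) else 1))) x (C ++ O)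
          = C ++ (O ++ [x]) := by
        rw [← List.append_assoc]
        exact PySem.List.insertBy_of_forall_not_before _ _ _
          (fun y _ => by by_cases hy : p y = true <;> simp [hx', hy])
      have := ih C (O ++ [x]) hC
        (by intro o ho; rcases List.mem_append.mp ho with h | h
            · exact hO o h
            · simpa using (List.mem_singleton.mp h) ▸ hx')
      simp only [List.foldl_cons, hins, this, List.filter_cons, hx']
      simp

theorem pv_sorted_binary {α : Type} (p : α → Bool) (xs : List α) :
    PySem.List.sorted xs (fun x => if p x then (0 : Int) else 1)
      = xs.filter p ++ xs.filter (fun x => !p x) := by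
  rw [PySem.List.sorted_eq_foldl_insertBy]
  simpa using pv_foldl_insertBy_binary p xs [] [] (by simp) (by simp)

-- the generic two-accumulator partition loop
theorem pv_partition_foldl {α : Type} (q : α → Bool) (xs : List α) :
    ∀ (a b : List α),
      xs.foldl (fun (acc : List α × List α) ch =>
          if q ch then (acc.1 ++ [ch], acc.2) else (acc.1, acc.2 ++ [ch])) (a, b)
      = (a ++ xs.filter q, b ++ xs.filter (fun x => !q x)) := by
  induction xs with
  | nil => intro a b; simp
  | cons x xs ih =>
    intro a b
    rw [List.foldl_cons]
    by_cases hx : q x = true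
    · rw [if_pos hx]
      rw [ih (a ++ [x]) b]
      simp [List.filter_cons, hx]
    · rw [if_neg hx]
      rw [ih a (b ++ [x])]
      simp only [Bool.not_eq_true] at hx
      simp [List.filter_cons, hx]

-- A's loop body is definitionally the partition loop with predicate pvIsCover
theorem pv_A_foldl (xs : List (List (String × String))) :
    ∀ (a b : List (List (String × String))),
      xs.foldl
        (fun (acc : List (List (String × String)) × List (List (String × String))) ch =>
          let filename_lower := PySem.Str.lower ((PySem.Dict.mk ch).getD "filename" "")
          let title_lower := PySem.Str.lower ((PySem.Dict.mk ch).getD "title" "")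
          if PySem.Str.isIn "cover" filename_lower || PySem.Str.isIn "cover" title_lower then
            (acc.1 ++ [ch], acc.2)
          else
            (acc.1, acc.2 ++ [ch]))
        (a, b)
      = (a ++ xs.filter pvIsCover, b ++ xs.filter (fun x => !pvIsCover x)) :=
  pv_partition_foldl pvIsCover xs

-- ===== VERDICT (by name: the statement is the Claim_ definition above) =====
theorem reorder_cover_first_py_spec : Claim_equal_reorder_cover_first_py := by
  intro chapters _ _
  unfold Spec_reorder_cover_first_py reorder_cover_first_py reorder_cover_first_py_alt
  rw [pv_sorted_binary pvIsCover chapters, pv_A_foldl chapters [] []]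
  simp
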